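-- pv_equiv track=rewrite | github.com/RealPotatoe/adventofcode2023 | day14/main.py | roll_stones_north
-- ===== SOURCE A (Python) =====
-- from typing import List
--
-- def roll_stones_north(stones: List[List[str]]) -> List[List[str]]:
--     rows, cols = len(stones), len(stones[0])
--     rolling_stones = [0] * cols
--     last_solid_stone = [-1] * cols
--
--     for col_idx in range(cols):
--         for row_idx in range(rows):
--             stone = stones[row_idx][col_idx]
--
--             if stone == "O":
--                 rolling_stones[col_idx] += 1
--
--             if stone == "#" or row_idx == rows - 1:
--                 for i in range(last_solid_stone[col_idx] + 1, row_idx + 1):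
--                     if rolling_stones[col_idx] > 0:
--                         stones[i][col_idx] = "O"
--                         rolling_stones[col_idx] -= 1
--                     elif not stones[i][col_idx] == "#":
--                         stones[i][col_idx] = "."
--
--                 last_solid_stone[col_idx] = row_idx
--
--     return stones
-- ===== SOURCE B (Python) =====
-- from typing import List
--
-- def roll_stones_north(stones: List[List[str]]) -> List[List[str]]:
--     rows, cols = len(stones), len(stones[0])
--     for c in range(cols):
--         next_free = 0
--         for r in range(rows):
--             cell = stones[r][c]
--             if cell == "#":
--                 next_free = r + 1
--             else:
--                 stones[r][c] = "."
--                 if cell == "O":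
--                     stones[next_free][c] = "O"
--                     next_free += 1
--     return stones
-- ===== Notes on version B (the rewrite author's own statement) =====
-- stated objective: simpler
-- what changed: A counts rolling stones per column and, at each '#' or the last row, back-fills the whole preceding segment with an inner index loop driven by counter and last-solid-stone arrays; B keeps a single next_free pointer per column and in one forward pass blanks each non-'#' cell and immediately writes each 'O' at next_free, with no counter arrays and no inner back-fill loop.
-- outside the precondition, e.g. on roll_stones_north([]): A raises IndexError, B raises IndexError; on roll_stones_north([['O', 'O'], ['.']]): A raises IndexError, B raises IndexError
import Mathlib
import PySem

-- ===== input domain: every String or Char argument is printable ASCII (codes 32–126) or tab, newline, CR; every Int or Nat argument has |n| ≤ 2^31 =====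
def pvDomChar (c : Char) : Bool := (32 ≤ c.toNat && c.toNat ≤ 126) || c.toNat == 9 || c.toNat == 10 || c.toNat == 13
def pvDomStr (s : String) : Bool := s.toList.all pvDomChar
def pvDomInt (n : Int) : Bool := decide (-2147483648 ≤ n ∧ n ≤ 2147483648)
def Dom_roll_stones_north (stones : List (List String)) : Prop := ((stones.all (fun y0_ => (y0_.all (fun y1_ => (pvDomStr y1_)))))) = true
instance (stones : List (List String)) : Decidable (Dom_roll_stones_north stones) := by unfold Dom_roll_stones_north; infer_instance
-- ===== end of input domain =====

-- B replaces A's per-column counter array and back-filling inner segment loop by a single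
-- forward pass per column with one sliding next_free pointer that blanks every non-'#' cell
-- and writes each 'O' at next_free immediately (objective: simpler; same return value; like A,
-- the Python B mutates `stones` in place — the equivalence proved here is about the return value).

-- ===== PORT A =====
-- body of A's innermost back-fill loop ('for i in range(last_solid_stone[col]+1, row_idx+1)');
-- list indexing is exact on the in-range indices admitted by Pre_ (pyGetD for reads,
-- List.set (with the provably nonnegative index) for Python's in-range item assignment)
def aFill (col : Int) (q : List (List String) × List Int) (i : Int) : List (List String) × List Int :=
  if PySem.List.pyGetD q.2 col 0 > 0 then
    (q.1.set i.toNat ((PySem.List.pyGetD q.1 i []).set col.toNat "O"),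
     q.2.set col.toNat (PySem.List.pyGetD q.2 col 0 - 1))
  else if ¬ (PySem.List.pyGetD (PySem.List.pyGetD q.1 i []) col "" = "#") then
    (q.1.set i.toNat ((PySem.List.pyGetD q.1 i []).set col.toNat "."), q.2)
  else q

-- body of A's row loop
def aRow (rows col : Int) (s : List (List String) × List Int × List Int) (row : Int) :
    List (List String) × List Int × List Int :=
  let stone := PySem.List.pyGetD (PySem.List.pyGetD s.1 row []) col ""
  let rolling := if stone = "O" then s.2.1.set col.toNat (PySem.List.pyGetD s.2.1 col 0 + 1) else s.2.1
  if stone = "#" ∨ row = rows - 1 then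
    let p := (PySem.List.pyRange (PySem.List.pyGetD s.2.2 col 0 + 1) (row + 1)).foldl (aFill col) (s.1, rolling)
    (p.1, p.2, s.2.2.set col.toNat row)
  else (s.1, rolling, s.2.2)

def roll_stones_north (stones : List (List String)) : List (List String) :=
  let rows : Int := stones.length
  let cols : Int := (stones.headD []).length
  (((PySem.List.pyRange 0 cols).foldl
      (fun s col => (PySem.List.pyRange 0 rows).foldl (aRow rows col) s)
      (stones, List.replicate cols.toNat 0, List.replicate cols.toNat (-1)))).1

-- ===== PORT B =====
-- body of B's row loop for one column col: state = (grid, next_free); reads the cell, at '#'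
-- moves next_free below it, otherwise blanks the cell and, if it was 'O', writes 'O' at next_free
def bRow (col : Int) (q : List (List String) × Int) (r : Int) : List (List String) × Int :=
  let cell := PySem.List.pyGetD (PySem.List.pyGetD q.1 r []) col ""
  if cell = "#" then (q.1, r + 1)
  else
    let st' := q.1.set r.toNat ((PySem.List.pyGetD q.1 r []).set col.toNat ".")
    if cell = "O" then
      (st'.set q.2.toNat ((PySem.List.pyGetD st' q.2 []).set col.toNat "O"), q.2 + 1)
    else (st', q.2)

def roll_stones_north_alt (stones : List (List String)) : List (List String) :=
  let rows : Int := stones.length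
  let cols : Int := (stones.headD []).length
  (PySem.List.pyRange 0 cols).foldl
    (fun st col => ((PySem.List.pyRange 0 rows).foldl (bRow col) (st, 0)).1) stones

-- ===== PRECONDITION & SPEC =====
-- Pre_ excludes exactly the inputs on which the Python A raises IndexError: the empty grid
-- (A evaluates stones[0]) and grids where some row is shorter than the first row (A indexes
-- stones[row][col] for every col < len(stones[0])).
def Pre_roll_stones_north (stones : List (List String)) : Prop :=
  stones ≠ [] ∧ ∀ row ∈ stones, (stones.headD []).length ≤ row.length
instance (stones : List (List String)) : Decidable (Pre_roll_stones_north stones) := by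
  unfold Pre_roll_stones_north; infer_instance

def pvWitness_roll_stones_north : List (List String) :=
  [[".", "O"], ["O", "#"], [".", "O"]]

def Spec_roll_stones_north (stones : List (List String)) (out : List (List String)) : Prop :=
  out = roll_stones_north_alt stones
instance (stones : List (List String)) (out : List (List String)) : Decidable (Spec_roll_stones_north stones out) := by
  unfold Spec_roll_stones_north; infer_instance

-- ===== CLAIM (what is proved, stated in full; the proofs are below) =====
def Claim_equal_roll_stones_north : Prop := ∀ (stones : List (List String)),
  Dom_roll_stones_north stones → Pre_roll_stones_north stones →
  Spec_roll_stones_north stones (roll_stones_north stones)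

-- ===== LEMMAS AND PROOFS =====

-- ---------- the common 1-D (single-column) specification ----------

def rollSeg (seg : List String) : List String :=
  List.replicate (seg.count "O") "O" ++ List.replicate (seg.length - seg.count "O") "."

def bScan (q : List String × List String) (cell : String) : List String × List String :=
  if cell = "#" then
    let k := q.2.count "O"
    (q.1 ++ List.replicate k "O" ++ List.replicate (q.2.length - k) "." ++ ["#"], [])
  else (q.1, q.2 ++ [cell])

def colB (ys : List String) : List String :=
  let p := ys.foldl bScan ([], [])
  p.1 ++ rollSeg p.2

-- ---------- 1-D version of A's loops ----------

def fillStep (q : List String × Int) (i : Int) : List String × Int :=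
  if q.2 > 0 then (q.1.set i.toNat "O", q.2 - 1)
  else if ¬ (PySem.List.pyGetD q.1 i "" = "#") then (q.1.set i.toNat ".", q.2)
  else q

def stepA (rows : Int) (s : List String × Int × Int) (row : Int) : List String × Int × Int :=
  let stone := PySem.List.pyGetD s.1 row ""
  let k := if stone = "O" then s.2.1 + 1 else s.2.1
  if stone = "#" ∨ row = rows - 1 then
    let p := (PySem.List.pyRange (s.2.2 + 1) (row + 1)).foldl fillStep (s.1, k)
    (p.1, p.2, row)
  else (s.1, k, s.2.2)

-- sequential fill as structural recursion on the segment being filled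
def fillSeq : List String → Int → List String × Int
  | [], k => ([], k)
  | x :: t, k =>
    if k > 0 then (("O" : String) :: (fillSeq t (k - 1)).1, (fillSeq t (k - 1)).2)
    else if ¬ (x = "#") then (("." : String) :: (fillSeq t k).1, (fillSeq t k).2)
    else (x :: (fillSeq t k).1, (fillSeq t k).2)

-- column write-back / column view of the grid
def applyColFrom (c : Nat) (out : List String) : Nat → List (List String) → List (List String)
  | _, [] => []
  | a, row :: t => row.set c (out.getD a "") :: applyColFrom c out (a + 1) t

def colOf (st : List (List String)) (c : Nat) : List String :=
  st.map (fun row => row.getD c "")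

theorem rollSeg_length (seg : List String) : (rollSeg seg).length = seg.length := by
  have h := @List.count_le_length String _ "O" seg
  simp [rollSeg]; omega

theorem bScan_hash (q : List String × List String) : bScan q "#" = (q.1 ++ rollSeg q.2 ++ ["#"], []) := by
  simp [bScan, rollSeg]

theorem bScan_not_hash (q : List String × List String) (cell : String) (h : cell ≠ "#") :
    bScan q cell = (q.1, q.2 ++ [cell]) := by
  simp [bScan, h]

theorem scan_no_hash (s : List String) (hs : ∀ x ∈ s, x ≠ "#") (out seg : List String) :
    s.foldl bScan (out, seg) = (out, seg ++ s) := by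
  induction s generalizing seg with
  | nil => simp
  | cons x t ih =>
    have hx : x ≠ "#" := hs x (by simp)
    simp only [List.foldl_cons, bScan_not_hash _ x hx]
    rw [ih (fun y hy => hs y (by simp [hy]))]
    simp

theorem scan_out_prefix (rest : List String) (out o' seg : List String) :
    rest.foldl bScan (out ++ o', seg) =
      (out ++ (rest.foldl bScan (o', seg)).1, (rest.foldl bScan (o', seg)).2) := by
  induction rest generalizing o' seg with
  | nil => simp
  | cons x t ih =>
    by_cases hx : x = "#"
    · subst hx
      simp only [List.foldl_cons, bScan_hash]
      rw [show (out ++ o') ++ rollSeg seg ++ ["#"] = out ++ (o' ++ rollSeg seg ++ ["#"]) by simp, ih]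
    · simp only [List.foldl_cons, bScan_not_hash _ x hx]
      exact ih o' (seg ++ [x])

theorem colB_nil : colB [] = [] := by simp [colB, rollSeg]

theorem colB_no_hash (s : List String) (hs : ∀ x ∈ s, x ≠ "#") : colB s = rollSeg s := by
  simp [colB, scan_no_hash s hs]

theorem colB_split (s rest : List String) (hs : ∀ x ∈ s, x ≠ "#") :
    colB (s ++ "#" :: rest) = rollSeg s ++ "#" :: colB rest := by
  simp only [colB, List.foldl_append, scan_no_hash s hs, List.foldl_cons, bScan_hash]
  rw [show ([] : List String) ++ rollSeg ([] ++ s) ++ ["#"] = (rollSeg s ++ ["#"]) ++ [] by simp,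
    scan_out_prefix]
  simp

theorem fillStep_length (q : List String × Int) (i : Int) :
    (fillStep q i).1.length = q.1.length := by
  unfold fillStep; split_ifs <;> simp

theorem foldl_fillStep_length (L : List Int) (q : List String × Int) :
    (L.foldl fillStep q).1.length = q.1.length := by
  induction L generalizing q with
  | nil => rfl
  | cons i t ih => rw [List.foldl_cons, ih, fillStep_length]

theorem fillSeq_cons_pos (x : String) (t : List String) (k : Int) (hk : k > 0) :
    fillSeq (x :: t) k = (("O" : String) :: (fillSeq t (k - 1)).1, (fillSeq t (k - 1)).2) := by
  rw [fillSeq, if_pos hk]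

theorem fillSeq_cons_dot (x : String) (t : List String) (k : Int) (hk : ¬ k > 0) (hx : ¬ x = "#") :
    fillSeq (x :: t) k = (("." : String) :: (fillSeq t k).1, (fillSeq t k).2) := by
  rw [fillSeq, if_neg hk, if_pos hx]

theorem fillSeq_cons_hash (t : List String) (k : Int) (hk : ¬ k > 0) :
    fillSeq ("#" :: t) k = (("#" : String) :: (fillSeq t k).1, (fillSeq t k).2) := by
  rw [fillSeq, if_neg hk, if_neg (by simp)]

theorem fillFold (mid : List String) (pre suf : List String) (k : Int) :
    (PySem.List.pyRange (pre.length : Int) ((pre.length : Int) + mid.length)).foldl fillStep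
        (pre ++ mid ++ suf, k) =
      (pre ++ (fillSeq mid k).1 ++ suf, (fillSeq mid k).2) := by
  induction mid generalizing pre k with
  | nil =>
    rw [PySem.List.pyRange_one_eq_nil (by simp)]
    simp [fillSeq]
  | cons x t ih =>
    rw [show ((pre.length : Int) + ((x :: t).length : Int)) = ((pre.length : Int) + 1) + (t.length : Int) by
      simp only [List.length_cons]; push_cast; ring]
    rw [PySem.List.pyRange_one_cons (by omega), List.foldl_cons]
    have hread : PySem.List.pyGetD (pre ++ x :: t ++ suf) (pre.length : Int) "" = x := by
      rw [PySem.List.pyGetD_eq_getElem _ _ (by positivity) (by simp only [List.length_append, List.length_cons]; push_cast; omega)]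
      simp [List.getElem_append_right (Nat.le_refl pre.length)]
    have hset : ∀ v : String, (pre ++ x :: t ++ suf).set ((pre.length : Int)).toNat v =
        (pre ++ [v]) ++ t ++ suf := by
      intro v
      simp
    have hIHlen : ∀ v : String, (((pre ++ [v]).length : Nat) : Int) = (pre.length : Int) + 1 := by
      intro v; simp
    by_cases hk : k > (0 : Int)
    · have hstep : fillStep (pre ++ x :: t ++ suf, k) (pre.length : Int) =
          ((pre ++ ["O"]) ++ t ++ suf, k - 1) := by
        unfold fillStep
        rw [if_pos (by exact hk)]
        rw [show ((pre ++ x :: t ++ suf, k).1.set ((pre.length : Int)).toNat "O") = (pre ++ ["O"]) ++ t ++ suf from hset "O"]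
      rw [hstep]
      have IH := ih (pre ++ ["O"]) (k - 1)
      rw [hIHlen "O"] at IH
      rw [IH, fillSeq_cons_pos x t k hk]
      simp
    · by_cases hx : x = "#"
      · have hstep : fillStep (pre ++ x :: t ++ suf, k) (pre.length : Int) =
            (pre ++ x :: t ++ suf, k) := by
          unfold fillStep
          rw [if_neg hk, if_neg (by simp [hread, hx])]
        rw [hstep]
        have IH := ih (pre ++ [x]) k
        rw [hIHlen x] at IH
        rw [show pre ++ x :: t ++ suf = (pre ++ [x]) ++ t ++ suf by simp, IH, hx,
          fillSeq_cons_hash t k hk]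
        simp [hx]
      · have hstep : fillStep (pre ++ x :: t ++ suf, k) (pre.length : Int) =
            ((pre ++ ["."]) ++ t ++ suf, k) := by
          unfold fillStep
          rw [if_neg hk, if_pos (by simp [hread, hx])]
          rw [show ((pre ++ x :: t ++ suf, k).1.set ((pre.length : Int)).toNat ".") = (pre ++ ["."]) ++ t ++ suf from hset "."]
        rw [hstep]
        have IH := ih (pre ++ ["."]) k
        rw [hIHlen "."] at IH
        rw [IH, fillSeq_cons_dot x t k hk (by simp [hx])]
        simp

theorem fillSeq_no_hash (seg : List String) (k : Int) (hs : ∀ x ∈ seg, x ≠ "#")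
    (h0 : 0 ≤ k) (hk : k ≤ seg.length) :
    fillSeq seg k =
      (List.replicate k.toNat "O" ++ List.replicate (seg.length - k.toNat) ".", 0) := by
  induction seg generalizing k with
  | nil =>
    have : k = 0 := by simp at hk; omega
    subst this; simp [fillSeq]
  | cons x t ih =>
    by_cases h1 : k > 0
    · rw [fillSeq_cons_pos x t k h1,
        ih (k - 1) (fun y hy => hs y (by simp [hy])) (by omega) (by simp at hk ⊢; omega)]
      have hrep : k.toNat = ((k - 1).toNat) + 1 := by omega
      rw [hrep, List.replicate_succ]
      have hlen : (x :: t).length - ((k - 1).toNat + 1) = t.length - (k - 1).toNat := by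
        simp only [List.length_cons]; omega
      rw [hlen]
      simp
    · have hk0 : k = 0 := by omega
      subst hk0
      rw [fillSeq_cons_dot x t 0 h1 (by simpa using hs x (by simp)),
        ih 0 (fun y hy => hs y (by simp [hy])) le_rfl (by positivity)]
      simp [List.replicate_succ]

theorem fillSeq_no_hash_count (seg : List String) (hs : ∀ x ∈ seg, x ≠ "#") :
    fillSeq seg (seg.count "O") = (rollSeg seg, 0) := by
  rw [fillSeq_no_hash seg _ hs (by positivity) (by exact_mod_cast List.count_le_length)]
  simp [rollSeg]

theorem fillSeq_append (s s2 : List String) (k : Int) :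
    fillSeq (s ++ s2) k =
      ((fillSeq s k).1 ++ (fillSeq s2 (fillSeq s k).2).1, (fillSeq s2 (fillSeq s k).2).2) := by
  induction s generalizing k with
  | nil => simp [fillSeq]
  | cons x t ih =>
    by_cases h1 : k > 0
    · rw [List.cons_append, fillSeq_cons_pos _ _ _ h1, fillSeq_cons_pos _ _ _ h1, ih]; simp
    · by_cases hx : x = "#"
      · subst hx
        rw [List.cons_append, fillSeq_cons_hash _ _ h1, fillSeq_cons_hash _ _ h1, ih]; simp
      · rw [List.cons_append, fillSeq_cons_dot _ _ _ h1 hx, fillSeq_cons_dot _ _ _ h1 hx, ih]; simp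

theorem fillSeq_hash_zero : fillSeq ["#"] (0 : Int) = (["#"], 0) := by
  rw [fillSeq_cons_hash [] 0 (by norm_num)]; rfl

theorem fillSeq_append_hash (seg : List String) (hs : ∀ x ∈ seg, x ≠ "#") :
    fillSeq (seg ++ ["#"]) (seg.count "O") = (rollSeg seg ++ ["#"], 0) := by
  rw [fillSeq_append, fillSeq_no_hash_count seg hs, fillSeq_hash_zero]

-- ---------- 1-D row loop of A ----------

theorem pyGetD_cons_at {α : Type} (xs ys : List α) (z : α) (j : Int) (hj : j = xs.length) (d : α) :
    PySem.List.pyGetD (xs ++ z :: ys) j d = z := by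
  subst hj
  rw [PySem.List.pyGetD_of_nonneg _ _ (by positivity), Int.toNat_natCast,
    List.getD_eq_getElem _ _ (by simp only [List.length_append, List.length_cons]; omega)]
  rw [List.getElem_append_right (Nat.le_refl xs.length)]
  simp

theorem stepA_skip (rows : Int) (ys : List String) (k last row : Int)
    (hx : ¬ PySem.List.pyGetD ys row "" = "#") (hr : ¬ row = rows - 1) :
    stepA rows (ys, k, last) row =
      (ys, (if PySem.List.pyGetD ys row "" = "O" then k + 1 else k), last) := by
  unfold stepA
  rw [if_neg (by push_neg; exact ⟨hx, hr⟩)]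

theorem stepA_flush (rows : Int) (ys : List String) (k last row : Int)
    (h : PySem.List.pyGetD ys row "" = "#" ∨ row = rows - 1) :
    stepA rows (ys, k, last) row =
      (((PySem.List.pyRange (last + 1) (row + 1)).foldl fillStep
          (ys, if PySem.List.pyGetD ys row "" = "O" then k + 1 else k)).1,
       ((PySem.List.pyRange (last + 1) (row + 1)).foldl fillStep
          (ys, if PySem.List.pyGetD ys row "" = "O" then k + 1 else k)).2,
       row) := by
  unfold stepA
  rw [if_pos h]

theorem counterSeg (seg : List String) (pre suf : List String) (k last rows : Int)
    (hs : ∀ x ∈ seg, x ≠ "#")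
    (hlt : (pre.length : Int) + seg.length ≤ rows - 1) :
    (PySem.List.pyRange (pre.length : Int) ((pre.length : Int) + seg.length)).foldl
        (stepA rows) (pre ++ seg ++ suf, k, last)
      = (pre ++ seg ++ suf, k + seg.count "O", last) := by
  induction seg generalizing pre k with
  | nil =>
    rw [PySem.List.pyRange_one_eq_nil (by simp)]
    simp
  | cons x t ih =>
    rw [show ((pre.length : Int) + ((x :: t).length : Int)) = ((pre.length : Int) + 1) + (t.length : Int) by
      simp only [List.length_cons]; push_cast; ring]
    rw [PySem.List.pyRange_one_cons (by omega), List.foldl_cons]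
    have hread : PySem.List.pyGetD (pre ++ x :: t ++ suf) (pre.length : Int) "" = x := by
      rw [PySem.List.pyGetD_eq_getElem _ _ (by positivity)
        (by simp only [List.length_append, List.length_cons]; push_cast; omega)]
      simp [List.getElem_append_right (Nat.le_refl pre.length)]
    have hx : x ≠ "#" := hs x (by simp)
    rw [stepA_skip rows _ k last _ (by rw [hread]; exact hx)
      (by simp only [List.length_cons] at hlt; push_cast at hlt; omega)]
    rw [hread]
    have IH := ih (pre ++ [x]) (if x = "O" then k + 1 else k)
      (fun y hy => hs y (by simp [hy]))
      (by simp only [List.length_append, List.length_cons, List.length_nil] at hlt ⊢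
          push_cast at hlt ⊢; omega)
    rw [show (((pre ++ [x]).length : Nat) : Int) = (pre.length : Int) + 1 by simp] at IH
    rw [show pre ++ x :: t ++ suf = (pre ++ [x]) ++ t ++ suf by simp, IH]
    have hcnt : (if x = "O" then k + 1 else k) + (t.count "O" : Int) = k + ((x :: t).count "O" : Int) := by
      by_cases hxo : x = "O"
      · simp [hxo, List.count_cons]; push_cast; omega
      · simp [hxo, List.count_cons]
    simp [hcnt]

theorem loopA : ∀ (n : Nat) (cur pre : List String), cur.length ≤ n → cur ≠ [] →
    (PySem.List.pyRange (pre.length : Int) ((pre.length : Int) + cur.length)).foldl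
        (stepA ((pre.length : Int) + cur.length)) (pre ++ cur, 0, (pre.length : Int) - 1)
      = (pre ++ colB cur, 0, (pre.length : Int) + cur.length - 1) := by
  intro n
  induction n with
  | zero => intro cur pre hlen hne; cases cur <;> simp_all
  | succ n ih =>
    intro cur pre hlen hne
    have hpos : 0 < cur.length := List.length_pos_of_ne_nil hne
    set a : Int := (pre.length : Int) with ha
    -- split cur at the first '#'
    set s : List String := cur.takeWhile (fun x => x ≠ "#") with hsdef
    have hsmem : ∀ x ∈ s, x ≠ "#" := by
      intro x hx
      simpa using List.mem_takeWhile_imp hx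
    cases hdw : cur.dropWhile (fun x => x ≠ "#") with
    | nil =>
      -- no '#' in cur
      have hcur : s = cur := by
        have := List.takeWhile_append_dropWhile (p := fun x => x ≠ "#") (l := cur)
        rw [hdw] at this; simpa [hsdef] using this
      have hall : ∀ x ∈ cur, x ≠ "#" := by rw [← hcur]; exact hsmem
      obtain ⟨front, z, hfz⟩ : ∃ front z, cur = front ++ [z] :=
        ⟨cur.dropLast, cur.getLast hne, (List.dropLast_append_getLast hne).symm⟩
      have hflen : front.length + 1 = cur.length := by rw [hfz]; simp
      rw [PySem.List.pyRange_one_append a (a + cur.length - 1) (a + cur.length)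
        (by omega) (by omega), List.foldl_append]
      rw [show (a + cur.length - 1 : Int) = a + (front.length : Int) by push_cast; omega] at *
      rw [show pre ++ cur = pre ++ front ++ [z] by rw [hfz]; simp] at *
      have hcs := counterSeg front pre [z] 0 (a - 1) (a + cur.length)
        (fun x hx => hall x (by rw [hfz]; simp [hx])) (by push_cast; omega)
      rw [ha] at hcs ⊢
      rw [hcs]
      rw [show (((pre.length : Int)) + (cur.length : Int)) = (a + front.length) + 1 by push_cast; omega,
        PySem.List.pyRange_one_cons (by omega), PySem.List.pyRange_one_eq_nil (by omega),
        List.foldl_cons, List.foldl_nil]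
      have hread : PySem.List.pyGetD (pre ++ front ++ [z]) (a + front.length) "" = z := by
        rw [show pre ++ front ++ [z] = (pre ++ front) ++ z :: [] by simp]
        exact pyGetD_cons_at (pre ++ front) [] z _
          (by simp only [List.length_append, ha]; push_cast; omega) ""
      rw [stepA_flush _ _ _ _ _ (Or.inr (by omega))]
      rw [show (a - 1 + 1 : Int) = (pre.length : Int) by omega,
        show (a + (front.length : Int) + 1 : Int) = (pre.length : Int) + ((front ++ [z]).length : Int) by
          simp only [List.length_append, List.length_singleton, ha]; push_cast; omega]
      have hff := fillFold (front ++ [z]) pre [] (if PySem.List.pyGetD (pre ++ front ++ [z]) (a + ↑front.length) "" = "O" then 0 + ↑(front.count "O") + 1 else 0 + ↑(front.count "O"))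
      rw [show pre ++ (front ++ [z]) ++ ([] : List String) = pre ++ front ++ [z] by simp] at hff
      rw [hff]
      have hkeq : (if PySem.List.pyGetD (pre ++ front ++ [z]) (a + ↑front.length) "" = "O" then 0 + (front.count "O" : Int) + 1 else 0 + (front.count "O" : Int)) = ((front ++ [z]).count "O" : Int) := by
        rw [hread]
        by_cases hz : z = "O" <;> simp [hz, List.count_append, List.count_cons] <;> push_cast <;> omega
      rw [hkeq, fillSeq_no_hash_count (front ++ [z]) (by rw [← hfz]; exact hall)]
      rw [colB_no_hash cur hall, hfz]
      simp [ha]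
    | cons hd rest =>
      -- cur = s ++ "#" :: rest
      have hhd : hd = "#" := by
        have hw : cur.dropWhile (fun x => x ≠ "#") ≠ [] := by rw [hdw]; simp
        have := List.head_dropWhile_not (fun x => x ≠ "#") hw
        simp only [hdw, List.head_cons] at this
        simpa using this
      have hcur : cur = s ++ "#" :: rest := by
        conv_lhs => rw [← List.takeWhile_append_dropWhile (p := fun x => x ≠ "#") (l := cur)]
        rw [hdw, hhd, hsdef]
      have hlens : s.length + 1 + rest.length = cur.length := by rw [hcur]; simp; omega
      rw [show pre ++ cur = pre ++ s ++ "#" :: rest by rw [hcur]; simp]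
      rw [PySem.List.pyRange_one_append a (a + s.length) (a + cur.length) (by omega)
        (by omega), List.foldl_append]
      have hcs := counterSeg s pre ("#" :: rest) 0 (a - 1) (a + cur.length) hsmem (by omega)
      rw [ha] at hcs ⊢
      rw [hcs]
      rw [PySem.List.pyRange_one_cons (show ((pre.length : Int)) + s.length < pre.length + cur.length by omega),
        List.foldl_cons]
      have hread : PySem.List.pyGetD (pre ++ s ++ "#" :: rest) ((pre.length : Int) + s.length) "" = "#" := by
        rw [show pre ++ s ++ "#" :: rest = (pre ++ s) ++ "#" :: rest by simp]
        exact pyGetD_cons_at (pre ++ s) rest "#" _ (by simp only [List.length_append]; push_cast; omega) ""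
      rw [stepA_flush _ _ _ _ _ (Or.inl hread), hread]
      rw [if_neg (by simp)]
      rw [show ((pre.length : Int) - 1 + 1 : Int) = (pre.length : Int) by omega,
        show ((pre.length : Int) + (s.length : Int) + 1 : Int) = (pre.length : Int) + ((s ++ ["#"]).length : Int) by
          simp only [List.length_append, List.length_singleton]; push_cast; omega]
      have hff := fillFold (s ++ ["#"]) pre rest (0 + (s.count "O" : Int))
      rw [show pre ++ (s ++ ["#"]) ++ rest = pre ++ s ++ "#" :: rest by simp] at hff
      rw [hff, show (0 + (s.count "O" : Int)) = (s.count "O" : Int) by ring,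
        fillSeq_append_hash s hsmem]
      rw [show colB cur = rollSeg s ++ "#" :: colB rest by rw [hcur, colB_split s rest hsmem]]
      simp only []
      rw [show ((pre.length : Int) + ((s ++ ["#"]).length : Int)) = (pre.length : Int) + (s.length : Int) + 1 by
        simp only [List.length_append, List.length_singleton]; push_cast; omega]
      cases rest with
      | nil =>
        rw [PySem.List.pyRange_one_eq_nil (by simp only [List.length_nil] at hlens; omega),
          List.foldl_nil, colB_nil]
        refine Prod.ext ?_ (Prod.ext ?_ ?_) <;> simp
        · simp only [List.length_nil] at hlens; push_cast; omega
      | cons r1 r2 =>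
        have hIH := ih (r1 :: r2) (pre ++ rollSeg s ++ ["#"]) (by simp only [List.length_cons] at hlens ⊢; omega)
          (by simp)
        rw [show (((pre ++ rollSeg s ++ ["#"]).length : Nat) : Int) = (pre.length : Int) + (s.length : Int) + 1 by
          simp only [List.length_append, List.length_singleton, rollSeg_length]; push_cast; omega] at hIH
        rw [show ((pre.length : Int) + (s.length : Int) + 1 + ((r1 :: r2).length : Int)) = (pre.length : Int) + (cur.length : Int) by
          simp only [List.length_cons] at hlens ⊢; push_cast; omega] at hIH
        rw [show ((pre.length : Int) + (s.length : Int) + 1 - 1 : Int) = (pre.length : Int) + (s.length : Int) by ring] at hIH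
        rw [show (pre ++ rollSeg s ++ ["#"]) ++ r1 :: r2 = pre ++ (rollSeg s ++ ["#"]) ++ r1 :: r2 by simp] at hIH
        rw [show (pre ++ rollSeg s ++ ["#"]) ++ colB (r1 :: r2) = pre ++ (rollSeg s ++ "#" :: colB (r1 :: r2)) by simp] at hIH
        rw [hIH]

-- ---------- 1-D version of B's loop ----------

def bStep (q : List String × Int) (r : Int) : List String × Int :=
  let cell := PySem.List.pyGetD q.1 r ""
  if cell = "#" then (q.1, r + 1)
  else
    let ys := q.1.set r.toNat "."
    if cell = "O" then (ys.set q.2.toNat "O", q.2 + 1) else (ys, q.2)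

theorem set_at_len {α : Type} (P : List α) (x v : α) (T : List α) :
    (P ++ x :: T).set P.length v = P ++ v :: T := by
  induction P with
  | nil => rfl
  | cons h t ih => simp [ih]

theorem bSeg : ∀ (rest : List String), (∀ x ∈ rest, x ≠ "#") →
    ∀ (pre : List String) (k m : Nat) (suf : List String),
    (PySem.List.pyRange ((pre.length + k + m : Nat) : Int)
        ((pre.length + k + m + rest.length : Nat) : Int)).foldl bStep
      (pre ++ List.replicate k "O" ++ List.replicate m "." ++ rest ++ suf,
       ((pre.length + k : Nat) : Int))
    = (pre ++ List.replicate (k + rest.count "O") "O"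
         ++ List.replicate (m + rest.length - rest.count "O") "." ++ suf,
       ((pre.length + k + rest.count "O" : Nat) : Int)) := by
  intro rest
  induction rest with
  | nil =>
    intro _ pre k m suf
    rw [PySem.List.pyRange_one_eq_nil (by simp)]
    simp
    all_goals omega
  | cons x t ih =>
    intro hs pre k m suf
    have hx : x ≠ "#" := hs x (by simp)
    rw [PySem.List.pyRange_one_cons (by push_cast [List.length_cons]; omega), List.foldl_cons]
    have hP : (pre ++ List.replicate k "O" ++ List.replicate m "." : List String).length
        = pre.length + k + m := by simp <;> omega
    have hassoc : pre ++ List.replicate k "O" ++ List.replicate m "." ++ (x :: t) ++ suf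
        = (pre ++ List.replicate k "O" ++ List.replicate m ".") ++ x :: (t ++ suf) := by simp
    have hread : PySem.List.pyGetD
        (pre ++ List.replicate k "O" ++ List.replicate m "." ++ (x :: t) ++ suf)
        ((pre.length + k + m : Nat) : Int) "" = x := by
      rw [hassoc]
      exact pyGetD_cons_at _ _ x _ (by rw [hP]) ""
    have hsetdot : (pre ++ List.replicate k "O" ++ List.replicate m "." ++ (x :: t) ++ suf).set
          ((pre.length + k + m : Nat) : Int).toNat "."
        = pre ++ List.replicate k "O" ++ List.replicate (m + 1) "." ++ t ++ suf := by
      rw [hassoc, Int.toNat_natCast, ← hP, set_at_len]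
      simp [List.replicate_succ' (n := m)] <;> omega
    by_cases hxo : x = "O"
    · -- the '.' write then the 'O' write at next_free
      have hstep : bStep
            (pre ++ List.replicate k "O" ++ List.replicate m "." ++ (x :: t) ++ suf,
             ((pre.length + k : Nat) : Int)) ((pre.length + k + m : Nat) : Int)
          = (pre ++ List.replicate (k + 1) "O" ++ List.replicate m "." ++ t ++ suf,
             ((pre.length + (k + 1) : Nat) : Int)) := by
        rw [bStep]
        simp only [hread]
        rw [if_neg (by simp [hxo]), if_pos hxo, hsetdot]
        refine Prod.ext ?_ ?_
        · -- the O-write lands on the head of the '.'-block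
          rw [show pre ++ List.replicate k "O" ++ List.replicate (m + 1) "." ++ t ++ suf
              = (pre ++ List.replicate k "O") ++ ("." : String) :: (List.replicate m "." ++ t ++ suf) by
                simp [List.replicate_succ]]
          rw [Int.toNat_natCast, show pre.length + k = (pre ++ List.replicate k "O" : List String).length by simp,
            set_at_len]
          simp [List.replicate_succ' (n := k)] <;> omega
        · push_cast; ring
      rw [hstep]
      have IH := ih (fun y hy => hs y (by simp [hy])) pre (k + 1) m suf
      rw [show ((pre.length + (k + 1) + m : Nat) : Int) = ((pre.length + k + m : Nat) : Int) + 1 by push_cast; ring,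
        show ((pre.length + (k + 1) + m + t.length : Nat) : Int) = ((pre.length + k + m + (x :: t).length : Nat) : Int) by
          simp only [List.length_cons]; push_cast; ring] at IH
      rw [IH]
      have hc : (x :: t).count "O" = t.count "O" + 1 := by simp [hxo]
      rw [hc]
      have e1 : k + 1 + t.count "O" = k + (t.count "O" + 1) := by omega
      have e2 : m + t.length - t.count "O" = m + (x :: t).length - (t.count "O" + 1) := by
        simp only [List.length_cons]; omega
      have e3 : pre.length + (k + 1) + t.count "O" = pre.length + k + (t.count "O" + 1) := by omega
      rw [e1, e2, e3]
    · -- only the '.' write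
      have hstep : bStep
            (pre ++ List.replicate k "O" ++ List.replicate m "." ++ (x :: t) ++ suf,
             ((pre.length + k : Nat) : Int)) ((pre.length + k + m : Nat) : Int)
          = (pre ++ List.replicate k "O" ++ List.replicate (m + 1) "." ++ t ++ suf,
             ((pre.length + k : Nat) : Int)) := by
        rw [bStep]
        simp only [hread]
        rw [if_neg (by simp [hx]), if_neg hxo, hsetdot]
      rw [hstep]
      have IH := ih (fun y hy => hs y (by simp [hy])) pre k (m + 1) suf
      rw [show ((pre.length + k + (m + 1) : Nat) : Int) = ((pre.length + k + m : Nat) : Int) + 1 by push_cast; ring,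
        show ((pre.length + k + (m + 1) + t.length : Nat) : Int) = ((pre.length + k + m + (x :: t).length : Nat) : Int) by
          simp only [List.length_cons]; push_cast; ring] at IH
      rw [IH]
      have hc : (x :: t).count "O" = t.count "O" := by simp [hxo]
      rw [hc]
      have e2 : m + 1 + t.length - t.count "O" = m + (x :: t).length - t.count "O" := by
        simp only [List.length_cons]; omega
      rw [e2]

theorem bLoop : ∀ (n : Nat) (cur pre : List String), cur.length ≤ n →
    ((PySem.List.pyRange (pre.length : Int) ((pre.length : Int) + cur.length)).foldl bStep
        (pre ++ cur, (pre.length : Int))).1 = pre ++ colB cur := by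
  intro n
  induction n with
  | zero =>
    intro cur pre hlen
    have : cur = [] := by cases cur <;> simp_all
    subst this
    rw [PySem.List.pyRange_one_eq_nil (by simp), List.foldl_nil, colB_nil]
  | succ n ih =>
    intro cur pre hlen
    set s : List String := cur.takeWhile (fun x => x ≠ "#") with hsdef
    have hsmem : ∀ x ∈ s, x ≠ "#" := by
      intro x hx
      simpa using List.mem_takeWhile_imp hx
    cases hdw : cur.dropWhile (fun x => x ≠ "#") with
    | nil =>
      -- no '#': one segment, handled wholly by bSeg
      have hcur : s = cur := by
        have := List.takeWhile_append_dropWhile (p := fun x => x ≠ "#") (l := cur)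
        rw [hdw] at this; simpa [hsdef] using this
      have hall : ∀ x ∈ cur, x ≠ "#" := by rw [← hcur]; exact hsmem
      have hbs := bSeg cur hall pre 0 0 []
      simp only [List.replicate_zero, List.append_nil, List.nil_append, Nat.add_zero,
        Nat.zero_add] at hbs
      rw [show ((pre.length : Int) + (cur.length : Int)) = ((pre.length + cur.length : Nat) : Int) by push_cast; ring]
      rw [hbs]
      rw [colB_no_hash cur hall, rollSeg]
      simp
    | cons hd rest =>
      have hhd : hd = "#" := by
        have hw : cur.dropWhile (fun x => x ≠ "#") ≠ [] := by rw [hdw]; simp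
        have := List.head_dropWhile_not (fun x => x ≠ "#") hw
        simp only [hdw, List.head_cons] at this
        simpa using this
      have hcur : cur = s ++ "#" :: rest := by
        conv_lhs => rw [← List.takeWhile_append_dropWhile (p := fun x => x ≠ "#") (l := cur)]
        rw [hdw, hhd, hsdef]
      have hlens : s.length + 1 + rest.length = cur.length := by rw [hcur]; simp; omega
      rw [show pre ++ cur = pre ++ s ++ "#" :: rest by rw [hcur]; simp]
      rw [PySem.List.pyRange_one_append (pre.length : Int) ((pre.length : Int) + s.length)
        ((pre.length : Int) + cur.length) (by omega) (by omega), List.foldl_append]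
      -- the hash-free segment s, via bSeg with the '#' and the rest as suffix
      have hbs := bSeg s hsmem pre 0 0 ("#" :: rest)
      simp only [List.replicate_zero, List.append_nil, List.nil_append, Nat.add_zero,
        Nat.zero_add] at hbs
      rw [show ((pre.length : Int) + (s.length : Int)) = ((pre.length + s.length : Nat) : Int) by push_cast; ring]
      rw [hbs]
      -- the '#' step
      rw [PySem.List.pyRange_one_cons
        (show ((pre.length + s.length : Nat) : Int) < (pre.length : Int) + cur.length by push_cast; omega),
        List.foldl_cons]
      have hPlen : (pre ++ List.replicate (s.count "O") "O"
          ++ List.replicate (s.length - s.count "O") "." : List String).length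
          = pre.length + s.length := by
        have := @List.count_le_length String _ "O" s
        simp
        omega
      have hread : PySem.List.pyGetD
          (pre ++ List.replicate (s.count "O") "O"
            ++ List.replicate (s.length - s.count "O") "." ++ "#" :: rest)
          ((pre.length + s.length : Nat) : Int) "" = "#" :=
        pyGetD_cons_at _ _ "#" _ (by rw [hPlen]) ""
      have hstep : bStep
          (pre ++ List.replicate (s.count "O") "O"
            ++ List.replicate (s.length - s.count "O") "." ++ "#" :: rest,
           ((pre.length + s.count "O" : Nat) : Int)) ((pre.length + s.length : Nat) : Int)
          = (pre ++ List.replicate (s.count "O") "O"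
              ++ List.replicate (s.length - s.count "O") "." ++ "#" :: rest,
             ((pre.length + s.length : Nat) : Int) + 1) := by
        rw [bStep]
        simp only [hread]
        simp
      rw [hstep]
      -- recurse on the rows below the '#', with the flushed prefix
      have hIH := ih rest (pre ++ rollSeg s ++ ["#"]) (by omega)
      rw [show ((pre ++ rollSeg s ++ ["#"] : List String).length) = pre.length + s.length + 1 by
        simp [rollSeg_length] <;> omega] at hIH
      rw [show ((pre.length + s.length + 1 : Nat) : Int) = ((pre.length + s.length : Nat) : Int) + 1 by
        push_cast; ring] at hIH
      rw [show ((pre.length + s.length : Nat) : Int) + 1 + (rest.length : Int)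
          = (pre.length : Int) + (cur.length : Int) by push_cast; omega] at hIH
      rw [show pre ++ List.replicate (s.count "O") "O"
            ++ List.replicate (s.length - s.count "O") "." ++ "#" :: rest
          = (pre ++ rollSeg s ++ ["#"]) ++ rest by simp [rollSeg]]
      rw [hIH]
      rw [show colB cur = rollSeg s ++ "#" :: colB rest by rw [hcur, colB_split s rest hsmem]]
      simp

-- ---------- column view of the grid ----------

theorem getD_set_self' {α : Type} (l : List α) (i : Nat) (v d : α) (h : i < l.length) :
    (l.set i v).getD i d = v := by
  rw [List.getD_eq_getElem _ _ (by simpa using h)]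
  exact List.getElem_set_self _

theorem getD_set_ne' {α : Type} (l : List α) (i j : Nat) (v d : α) (h : i ≠ j) :
    (l.set i v).getD j d = l.getD j d := by
  by_cases hj : j < l.length
  · rw [List.getD_eq_getElem _ _ (by simpa using hj), List.getD_eq_getElem _ _ hj]
    exact List.getElem_set_ne h _
  · rw [List.getD_eq_default _ _ (by simpa using hj), List.getD_eq_default _ _ (by omega)]

theorem applyColFrom_length (c : Nat) (out : List String) (a : Nat) (st : List (List String)) :
    (applyColFrom c out a st).length = st.length := by
  induction st generalizing a with
  | nil => rfl
  | cons row t ih => simp [applyColFrom, ih]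

theorem applyColFrom_getD (c : Nat) (out : List String) (st : List (List String)) :
    ∀ (a r : Nat), r < st.length →
      (applyColFrom c out a st).getD r [] = (st.getD r []).set c (out.getD (a + r) "") := by
  induction st with
  | nil => intro a r h; simp at h
  | cons row t ih =>
    intro a r h
    cases r with
    | zero => simp [applyColFrom]
    | succ r' =>
      simp only [applyColFrom, List.getD_cons_succ]
      rw [ih (a + 1) r' (by simpa using h)]
      congr 2
      omega

theorem applyColFrom_congr (c : Nat) (out1 out2 : List String) (st : List (List String)) :
    ∀ (a : Nat), (∀ j, a ≤ j → out1.getD j "" = out2.getD j "") →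
      applyColFrom c out1 a st = applyColFrom c out2 a st := by
  induction st with
  | nil => intro a _; rfl
  | cons row t ih =>
    intro a h
    simp only [applyColFrom]
    rw [h a (Nat.le_refl a), ih (a + 1) (fun j hj => h j (by omega))]

theorem applyColFrom_set (c : Nat) :
    ∀ (st : List (List String)) (out : List String) (a r : Nat) (v : String),
      r < st.length → a + r < out.length →
      (applyColFrom c out a st).set r (((applyColFrom c out a st).getD r []).set c v)
        = applyColFrom c (out.set (a + r) v) a st := by
  intro st
  induction st with
  | nil => intro out a r v h _; simp at h
  | cons row t ih =>
    intro out a r v h h2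
    cases r with
    | zero =>
      simp only [applyColFrom, List.getD_cons_zero, List.set_cons_zero, List.set_set, Nat.add_zero]
      rw [getD_set_self' out a v "" (by omega)]
      rw [applyColFrom_congr c out (out.set a v) t (a + 1)
        (fun j hj => (getD_set_ne' out a j v "" (by omega)).symm)]
    | succ r' =>
      simp only [applyColFrom, List.getD_cons_succ, List.set_cons_succ]
      rw [show a + (r' + 1) = a + 1 + r' by omega]
      rw [ih out (a + 1) r' v (by simpa using h) (by omega)]
      rw [getD_set_ne' out (a + 1 + r') a v "" (by omega)]

theorem applyColFrom_id (c : Nat) :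
    ∀ (st : List (List String)) (out : List String) (a : Nat),
      (∀ j, j < st.length → out.getD (a + j) "" = (st.getD j []).getD c "") →
      (∀ row ∈ st, c < row.length) →
      applyColFrom c out a st = st := by
  intro st
  induction st with
  | nil => intro out a _ _; rfl
  | cons row t ih =>
    intro out a hj hc
    simp only [applyColFrom]
    have h0 := hj 0 (by simp)
    simp only [Nat.add_zero, List.getD_cons_zero] at h0
    rw [h0, show row.set c (row.getD c "") = row by
        rw [List.getD_eq_getElem row "" (hc row (by simp))]; exact List.set_getElem_self _,
      ih out (a + 1) (fun j hjt => by
        rw [show a + 1 + j = a + (j + 1) by omega]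
        exact hj (j + 1) (by simpa using hjt)) (fun r hr => hc r (by simp [hr]))]

theorem applyColFrom_rowlen (c : Nat) (m : Nat) :
    ∀ (st : List (List String)) (out : List String) (a : Nat),
      (∀ row ∈ st, m ≤ row.length) →
      ∀ row' ∈ applyColFrom c out a st, m ≤ row'.length := by
  intro st
  induction st with
  | nil => intro out a _ row' h; simp [applyColFrom] at h
  | cons row t ih =>
    intro out a h row' h'
    simp only [applyColFrom, List.mem_cons] at h'
    rcases h' with h' | h'
    · subst h'; simpa using h row (by simp)
    · exact ih out (a + 1) (fun r hr => h r (by simp [hr])) row' h'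

-- ---------- transfer: A's grid loops act on one column ----------

theorem read_cell (c : Int) (hc0 : 0 ≤ c) (G : List (List String)) (ys : List String) (i : Int)
    (h0 : 0 ≤ i) (h1 : i < (G.length : Int)) (hG : ∀ row ∈ G, c.toNat < row.length) :
    PySem.List.pyGetD (PySem.List.pyGetD (applyColFrom c.toNat ys 0 G) i []) c ""
      = PySem.List.pyGetD ys i "" := by
  rw [PySem.List.pyGetD_of_nonneg _ _ h0, PySem.List.pyGetD_of_nonneg _ _ hc0,
    PySem.List.pyGetD_of_nonneg _ _ h0]
  rw [applyColFrom_getD c.toNat ys G 0 i.toNat (by omega), Nat.zero_add]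
  refine getD_set_self' _ _ _ _ ?_
  refine hG _ ?_
  rw [List.getD_eq_getElem _ _ (by omega)]
  exact List.getElem_mem _

theorem aFill_step (c : Int) (hc0 : 0 ≤ c) (G : List (List String)) (R : List Int)
    (hG : ∀ row ∈ G, c.toNat < row.length) (hR : c.toNat < R.length)
    (ys : List String) (k : Int) (i : Int) (h0 : 0 ≤ i) (h1 : i < (G.length : Int))
    (hlen : ys.length = G.length) :
    aFill c (applyColFrom c.toNat ys 0 G, R.set c.toNat k) i
      = (applyColFrom c.toNat (fillStep (ys, k) i).1 0 G,
         R.set c.toNat (fillStep (ys, k) i).2) := by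
  have hcnt : PySem.List.pyGetD (R.set c.toNat k) c 0 = k := by
    rw [PySem.List.pyGetD_of_nonneg _ _ hc0]
    exact getD_set_self' R c.toNat k 0 hR
  have hrd := read_cell c hc0 G ys i h0 h1 hG
  have hwr : ∀ v : String,
      (applyColFrom c.toNat ys 0 G).set i.toNat
          ((PySem.List.pyGetD (applyColFrom c.toNat ys 0 G) i []).set c.toNat v)
        = applyColFrom c.toNat (ys.set i.toNat v) 0 G := by
    intro v
    rw [PySem.List.pyGetD_of_nonneg _ _ h0]
    have := applyColFrom_set c.toNat G ys 0 i.toNat v (by omega) (by omega)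
    simpa using this
  unfold aFill fillStep
  rw [hcnt, hrd]
  split_ifs with hk hsh
  · rw [hwr "O", List.set_set]
  · rfl
  · simp only []
    rw [hwr "."]

theorem fill_transfer (c : Int) (hc0 : 0 ≤ c) (G : List (List String)) (R : List Int)
    (hG : ∀ row ∈ G, c.toNat < row.length) (hR : c.toNat < R.length) :
    ∀ (L : List Int) (ys : List String) (k : Int),
      (∀ i ∈ L, 0 ≤ i ∧ i < (G.length : Int)) → ys.length = G.length →
      L.foldl (aFill c) (applyColFrom c.toNat ys 0 G, R.set c.toNat k)
        = (applyColFrom c.toNat (L.foldl fillStep (ys, k)).1 0 G,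
           R.set c.toNat (L.foldl fillStep (ys, k)).2) := by
  intro L
  induction L with
  | nil => intro ys k _ _; rfl
  | cons i t ih =>
    intro ys k hmem hlen
    rw [List.foldl_cons, List.foldl_cons,
      aFill_step c hc0 G R hG hR ys k i (hmem i (by simp)).1 (hmem i (by simp)).2 hlen]
    rw [ih (fillStep (ys, k) i).1 (fillStep (ys, k) i).2
      (fun j hj => hmem j (by simp [hj])) (by rw [fillStep_length]; exact hlen)]

theorem aRow_step (c : Int) (hc0 : 0 ≤ c) (rows : Int) (G : List (List String)) (R Last : List Int)
    (hrows : rows = (G.length : Int))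
    (hG : ∀ row ∈ G, c.toNat < row.length) (hR : c.toNat < R.length) (hL : c.toNat < Last.length)
    (ys : List String) (k l : Int) (row : Int) (h0 : 0 ≤ row) (h1 : row < rows)
    (hlen : ys.length = G.length) (hl : -1 ≤ l) :
    aRow rows c (applyColFrom c.toNat ys 0 G, R.set c.toNat k, Last.set c.toNat l) row
      = (applyColFrom c.toNat (stepA rows (ys, k, l) row).1 0 G,
         R.set c.toNat (stepA rows (ys, k, l) row).2.1,
         Last.set c.toNat (stepA rows (ys, k, l) row).2.2) := by
  have hrd := read_cell c hc0 G ys row h0 (by omega) hG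
  have hcnt : PySem.List.pyGetD (R.set c.toNat k) c 0 = k := by
    rw [PySem.List.pyGetD_of_nonneg _ _ hc0]
    exact getD_set_self' R c.toNat k 0 hR
  have hlst : PySem.List.pyGetD (Last.set c.toNat l) c 0 = l := by
    rw [PySem.List.pyGetD_of_nonneg _ _ hc0]
    exact getD_set_self' Last c.toNat l 0 hL
  have hroll : (if PySem.List.pyGetD ys row "" = "O"
        then (R.set c.toNat k).set c.toNat (PySem.List.pyGetD (R.set c.toNat k) c 0 + 1)
        else R.set c.toNat k)
      = R.set c.toNat (if PySem.List.pyGetD ys row "" = "O" then k + 1 else k) := by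
    rw [hcnt]
    split_ifs
    · rw [List.set_set]
    · rfl
  simp only [aRow, stepA]
  rw [hrd, hroll, hlst]
  by_cases hbr : (PySem.List.pyGetD ys row "" = "#" ∨ row = rows - 1)
  · rw [if_pos hbr, if_pos hbr]
    simp only []
    rw [fill_transfer c hc0 G R hG hR (PySem.List.pyRange (l + 1) (row + 1)) ys
      (if PySem.List.pyGetD ys row "" = "O" then k + 1 else k)
      (fun i hi => by rw [PySem.List.mem_pyRange_one] at hi; omega) hlen]
    rw [List.set_set]
  · rw [if_neg hbr, if_neg hbr]

theorem stepA_inv (rows : Int) (ys : List String) (k l row : Int) (h0 : 0 ≤ row) (hl : -1 ≤ l) :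
    (stepA rows (ys, k, l) row).1.length = ys.length ∧ -1 ≤ (stepA rows (ys, k, l) row).2.2 := by
  simp only [stepA]
  split_ifs <;> refine ⟨?_, ?_⟩ <;> simp [foldl_fillStep_length] <;> omega

theorem row_transfer (c : Int) (hc0 : 0 ≤ c) (rows : Int) (G : List (List String)) (R Last : List Int)
    (hrows : rows = (G.length : Int))
    (hG : ∀ row ∈ G, c.toNat < row.length) (hR : c.toNat < R.length) (hL : c.toNat < Last.length) :
    ∀ (L : List Int) (ys : List String) (k l : Int),
      (∀ i ∈ L, 0 ≤ i ∧ i < rows) → ys.length = G.length → -1 ≤ l →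
      L.foldl (aRow rows c) (applyColFrom c.toNat ys 0 G, R.set c.toNat k, Last.set c.toNat l)
        = (applyColFrom c.toNat (L.foldl (stepA rows) (ys, k, l)).1 0 G,
           R.set c.toNat (L.foldl (stepA rows) (ys, k, l)).2.1,
           Last.set c.toNat (L.foldl (stepA rows) (ys, k, l)).2.2) := by
  intro L
  induction L with
  | nil => intro ys k l _ _ _; rfl
  | cons i t ih =>
    intro ys k l hmem hlen hl
    have h0 := (hmem i (by simp)).1
    have h1 := (hmem i (by simp)).2
    have hinv := stepA_inv rows ys k l i h0 hl
    rw [List.foldl_cons, List.foldl_cons,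
      aRow_step c hc0 rows G R Last hrows hG hR hL ys k l i h0 h1 hlen hl]
    have := ih (stepA rows (ys, k, l) i).1 (stepA rows (ys, k, l) i).2.1
      (stepA rows (ys, k, l) i).2.2 (fun j hj => hmem j (by simp [hj]))
      (by rw [hinv.1]; exact hlen) hinv.2
    simpa using this

-- ---------- transfer: B's grid loop acts on one column ----------

theorem bStep_len (ys : List String) (nf r : Int) :
    (bStep (ys, nf) r).1.length = ys.length := by
  rw [bStep]
  simp only []
  split_ifs <;> simp

theorem bStep_nf (ys : List String) (nf r : Int) (h0 : 0 ≤ nf) (h1 : nf ≤ r) :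
    0 ≤ (bStep (ys, nf) r).2 ∧ (bStep (ys, nf) r).2 ≤ r + 1 := by
  rw [bStep]
  simp only []
  split_ifs <;> constructor <;> omega

theorem bRow_step (c : Int) (hc0 : 0 ≤ c) (G : List (List String))
    (hG : ∀ row ∈ G, c.toNat < row.length)
    (ys : List String) (nf r : Int) (h0 : 0 ≤ r) (h1 : r < (G.length : Int))
    (hnf0 : 0 ≤ nf) (hnf1 : nf ≤ r) (hlen : ys.length = G.length) :
    bRow c (applyColFrom c.toNat ys 0 G, nf) r
      = (applyColFrom c.toNat (bStep (ys, nf) r).1 0 G, (bStep (ys, nf) r).2) := by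
  have hrd := read_cell c hc0 G ys r h0 h1 hG
  have hwr : ∀ (zs : List String) (i : Int) (v : String), zs.length = G.length → 0 ≤ i → i < (G.length : Int) →
      (applyColFrom c.toNat zs 0 G).set i.toNat
          ((PySem.List.pyGetD (applyColFrom c.toNat zs 0 G) i []).set c.toNat v)
        = applyColFrom c.toNat (zs.set i.toNat v) 0 G := by
    intro zs i v hzl hi0 hi1
    rw [PySem.List.pyGetD_of_nonneg _ _ hi0]
    have := applyColFrom_set c.toNat G zs 0 i.toNat v (by omega) (by omega)
    simpa using this
  rw [bRow, bStep]
  simp only [hrd]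
  by_cases hh : PySem.List.pyGetD ys r "" = "#"
  · rw [if_pos hh, if_pos hh]
  · rw [if_neg hh, if_neg hh]
    rw [hwr ys r "." hlen h0 h1]
    by_cases ho : PySem.List.pyGetD ys r "" = "O"
    · rw [if_pos ho, if_pos ho]
      rw [hwr (ys.set r.toNat ".") nf "O" (by simpa using hlen) hnf0 (by omega)]
    · rw [if_neg ho, if_neg ho]

theorem bFold (c : Int) (hc0 : 0 ≤ c) (G : List (List String))
    (hG : ∀ row ∈ G, c.toNat < row.length) :
    ∀ (n : Nat) (a : Int) (ys : List String) (nf : Int),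
      ((G.length : Int) - a).toNat = n → 0 ≤ nf → nf ≤ a → ys.length = G.length →
      (PySem.List.pyRange a (G.length : Int)).foldl (bRow c) (applyColFrom c.toNat ys 0 G, nf)
        = (applyColFrom c.toNat ((PySem.List.pyRange a (G.length : Int)).foldl bStep (ys, nf)).1 0 G,
           ((PySem.List.pyRange a (G.length : Int)).foldl bStep (ys, nf)).2) := by
  intro n
  induction n with
  | zero =>
    intro a ys nf hn _ _ _
    rw [PySem.List.pyRange_one_eq_nil (by omega)]
    rfl
  | succ n ih =>
    intro a ys nf hn hnf0 hnf1 hlen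
    have ha : a < (G.length : Int) := by omega
    have h0 : 0 ≤ a := by omega
    rw [PySem.List.pyRange_one_cons ha, List.foldl_cons, List.foldl_cons,
      bRow_step c hc0 G hG ys nf a h0 ha hnf0 hnf1 hlen]
    have hb := bStep_nf ys nf a hnf0 hnf1
    exact ih (a + 1) (bStep (ys, nf) a).1 (bStep (ys, nf) a).2 (by omega)
      hb.1 (by omega) (by rw [bStep_len]; exact hlen)

-- ---------- per-column lemmas and the outer loop ----------

theorem set_getD_cancel {α : Type} (l : List α) (i : Nat) (d : α) (h : i < l.length) :
    l.set i (l.getD i d) = l := by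
  rw [List.getD_eq_getElem _ _ h]
  exact List.set_getElem_self _

theorem loopA0 (ys : List String) (hne : ys ≠ []) :
    (PySem.List.pyRange 0 (ys.length : Int)).foldl (stepA (ys.length : Int)) (ys, 0, -1)
      = (colB ys, 0, (ys.length : Int) - 1) := by
  have h := loopA ys.length ys [] le_rfl hne
  simpa using h

theorem colOf_getD (st : List (List String)) (c : Nat) (j : Nat) (hj : j < st.length) :
    (colOf st c).getD j "" = (st.getD j []).getD c "" := by
  rw [List.getD_eq_getElem _ _ (by simpa [colOf] using hj), List.getD_eq_getElem _ _ hj]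
  simp [colOf]

theorem colA_grid (c : Int) (hc0 : 0 ≤ c) (G : List (List String)) (R Last : List Int)
    (hGne : G ≠ []) (hG : ∀ row ∈ G, c.toNat < row.length)
    (hR : c.toNat < R.length) (hR0 : R.getD c.toNat 0 = 0)
    (hL : c.toNat < Last.length) (hL0 : Last.getD c.toNat 0 = -1) :
    (PySem.List.pyRange 0 (G.length : Int)).foldl (aRow (G.length : Int) c) (G, R, Last)
      = (applyColFrom c.toNat (colB (colOf G c.toNat)) 0 G, R,
         Last.set c.toNat ((G.length : Int) - 1)) := by
  have hys : (colOf G c.toNat).length = G.length := by simp [colOf]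
  have hid : applyColFrom c.toNat (colOf G c.toNat) 0 G = G :=
    applyColFrom_id c.toNat G (colOf G c.toNat) 0
      (fun j hj => by rw [Nat.zero_add]; exact colOf_getD G c.toNat j hj) hG
  have e1 : R.set c.toNat 0 = R := by rw [← hR0]; exact set_getD_cancel R c.toNat 0 hR
  have e2 : Last.set c.toNat (-1) = Last := by rw [← hL0]; exact set_getD_cancel Last c.toNat 0 hL
  have htr := row_transfer c hc0 (G.length : Int) G R Last rfl hG hR hL
    (PySem.List.pyRange 0 (G.length : Int)) (colOf G c.toNat) 0 (-1)
    (fun i hi => by rw [PySem.List.mem_pyRange_one] at hi; exact ⟨hi.1, hi.2⟩) hys (by omega)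
  rw [hid, e1, e2] at htr
  rw [htr]
  have hfold : (PySem.List.pyRange 0 (G.length : Int)).foldl (stepA (G.length : Int))
      (colOf G c.toNat, 0, -1) = (colB (colOf G c.toNat), 0, (G.length : Int) - 1) := by
    have hnee : colOf G c.toNat ≠ [] := by
      intro h
      exact hGne (by simpa [colOf] using congrArg List.length h)
    have := loopA0 (colOf G c.toNat) hnee
    rw [hys] at this
    exact this
  rw [hfold, e1]

theorem colB_grid (c : Int) (hc0 : 0 ≤ c) (G : List (List String))
    (hG : ∀ row ∈ G, c.toNat < row.length) :
    ((PySem.List.pyRange 0 (G.length : Int)).foldl (bRow c) (G, 0)).1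
      = applyColFrom c.toNat (colB (colOf G c.toNat)) 0 G := by
  have hys : (colOf G c.toNat).length = G.length := by simp [colOf]
  have hid : applyColFrom c.toNat (colOf G c.toNat) 0 G = G :=
    applyColFrom_id c.toNat G (colOf G c.toNat) 0
      (fun j hj => by rw [Nat.zero_add]; exact colOf_getD G c.toNat j hj) hG
  have hbf := bFold c hc0 G hG ((G.length : Int) - 0).toNat 0 (colOf G c.toNat) 0
    rfl le_rfl le_rfl hys
  rw [hid] at hbf
  rw [hbf]
  have hbl := bLoop (colOf G c.toNat).length (colOf G c.toNat) [] le_rfl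
  simp only [List.length_nil, Nat.cast_zero, List.nil_append, Int.zero_add] at hbl
  rw [hys] at hbl
  rw [hbl]

theorem outer_loop (rows cols : Int) (hrpos : 1 ≤ rows) :
    ∀ (n : Nat) (c : Int) (G : List (List String)) (R L : List Int),
      0 ≤ c → (cols - c).toNat = n →
      (G.length : Int) = rows →
      (∀ row ∈ G, cols.toNat ≤ row.length) →
      R = List.replicate cols.toNat 0 →
      L.length = cols.toNat →
      (∀ j : Nat, c.toNat ≤ j → j < cols.toNat → L.getD j 0 = -1) →
      ((PySem.List.pyRange c cols).foldl
          (fun s col => (PySem.List.pyRange 0 rows).foldl (aRow rows col) s) (G, R, L)).1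
        = (PySem.List.pyRange c cols).foldl
            (fun st col => ((PySem.List.pyRange 0 rows).foldl (bRow col) (st, 0)).1) G := by
  intro n
  induction n with
  | zero =>
    intro c G R L hc0 hn _ _ _ _ _
    have hle : cols ≤ c := by omega
    rw [PySem.List.pyRange_one_eq_nil hle]
    rfl
  | succ n ih =>
    intro c G R L hc0 hn hGlen hGrow hRrep hLlen hLval
    have hclt : c < cols := by omega
    have hcn : c.toNat < cols.toNat := by omega
    rw [PySem.List.pyRange_one_cons hclt, List.foldl_cons, List.foldl_cons]
    have hGne : G ≠ [] := by
      intro h; rw [h] at hGlen; simp at hGlen; omega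
    have hG : ∀ row ∈ G, c.toNat < row.length := fun row hr => by
      have := hGrow row hr; omega
    have hca := colA_grid c hc0 G R L hGne hG
      (by rw [hRrep]; simpa using hcn) (by rw [hRrep]; exact List.getD_replicate 0 hcn)
      (by omega) (hLval c.toNat (Nat.le_refl _) hcn)
    rw [show ((G.length : Nat) : Int) = rows from hGlen] at hca
    rw [hca]
    have hcb := colB_grid c hc0 G hG
    rw [show ((G.length : Nat) : Int) = rows from hGlen] at hcb
    rw [hcb]
    exact ih (c + 1) (applyColFrom c.toNat (colB (colOf G c.toNat)) 0 G) R
      (L.set c.toNat (rows - 1))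
      (by omega) (by omega)
      (by rw [applyColFrom_length]; exact hGlen)
      (fun row hr => applyColFrom_rowlen c.toNat cols.toNat G _ 0 hGrow row hr)
      hRrep (by simpa using hLlen)
      (fun j hj1 hj2 => by
        rw [getD_set_ne' L c.toNat j _ 0 (by omega)]
        exact hLval j (by omega) hj2)
-- ===== VERDICT (by name: the statement is the Claim_ definition above) =====
theorem roll_stones_north_spec : Claim_equal_roll_stones_north := by
  intro stones _ hpre
  obtain ⟨hne, hrow⟩ := hpre
  unfold Spec_roll_stones_north
  have hrows1 : (1 : Int) ≤ (stones.length : Int) := by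
    have := List.length_pos_of_ne_nil hne; omega
  have hA : roll_stones_north stones =
      ((PySem.List.pyRange 0 ((stones.headD []).length : Int)).foldl
        (fun s col => (PySem.List.pyRange 0 (stones.length : Int)).foldl
          (aRow (stones.length : Int) col) s)
        (stones, List.replicate ((stones.headD []).length : Int).toNat 0,
          List.replicate ((stones.headD []).length : Int).toNat (-1))).1 := rfl
  have hB : roll_stones_north_alt stones =
      (PySem.List.pyRange 0 ((stones.headD []).length : Int)).foldl
        (fun st col => ((PySem.List.pyRange 0 (stones.length : Int)).foldl
          (bRow col) (st, 0)).1) stones := rfl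
  rw [hA, hB]
  exact outer_loop (stones.length : Int) ((stones.headD []).length : Int) hrows1
    (stones.headD []).length 0 stones _ _
    le_rfl (by simp) rfl
    (fun row hr => by have := hrow row hr; simpa using this)
    (by simp) (by simp)
    (fun j _ hj => List.getD_replicate _ (by simpa using hj))
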